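-- pv_equiv track=rewrite | github.com/BrianCYL/DRL-Assignment-2 | TDLearning.py | generate_symmetries
-- ===== SOURCE A (Python) =====
-- def generate_symmetries(pattern):
--     # TODO: Generate 8 symmetrical transformations of the given pattern.
--     rot90_pattern = [(c, 3 - r) for (r, c) in pattern] # rot90
--     rot180_pattern = [(3 - r, 3 - c) for (r, c) in pattern] # rot180
--     rot270_pattern = [(3 - c, r) for (r, c) in pattern] # rot270
--     flip_pattern = [(r, 3 - c) for (r, c) in pattern] # flip
--     flip_rot90_pattern = [(c, 3 - r) for (r, c) in flip_pattern] # flip + rot90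
--     flip_rot180_pattern = [(3 - r, 3 - c) for (r, c) in flip_pattern] # flip + rot180
--     flip_rot270_pattern = [(3 - c, r) for (r, c) in flip_pattern] # flip + rot270
--     return [pattern, rot90_pattern, rot180_pattern, rot270_pattern, flip_pattern, flip_rot90_pattern, flip_rot180_pattern, flip_rot270_pattern]
-- ===== SOURCE B (Python) =====
-- def generate_symmetries(pattern):
--     def rot(p):
--         return [(c, 3 - r) for (r, c) in p]
--     syms = [pattern]
--     cur = pattern
--     for _ in range(3):
--         cur = rot(cur)
--         syms.append(cur)
--     flip = [(r, 3 - c) for (r, c) in pattern]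
--     syms.append(flip)
--     cur = flip
--     for _ in range(3):
--         cur = rot(cur)
--         syms.append(cur)
--     return syms
-- ===== Notes on version B (the rewrite author's own statement) =====
-- stated objective: simpler
-- what changed: Replaces the seven separate closed-form coordinate formulas by one rot90 helper applied iteratively in two 3-step loops (to the pattern and to its flip), building the list with a cursor and append.
import Mathlib
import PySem

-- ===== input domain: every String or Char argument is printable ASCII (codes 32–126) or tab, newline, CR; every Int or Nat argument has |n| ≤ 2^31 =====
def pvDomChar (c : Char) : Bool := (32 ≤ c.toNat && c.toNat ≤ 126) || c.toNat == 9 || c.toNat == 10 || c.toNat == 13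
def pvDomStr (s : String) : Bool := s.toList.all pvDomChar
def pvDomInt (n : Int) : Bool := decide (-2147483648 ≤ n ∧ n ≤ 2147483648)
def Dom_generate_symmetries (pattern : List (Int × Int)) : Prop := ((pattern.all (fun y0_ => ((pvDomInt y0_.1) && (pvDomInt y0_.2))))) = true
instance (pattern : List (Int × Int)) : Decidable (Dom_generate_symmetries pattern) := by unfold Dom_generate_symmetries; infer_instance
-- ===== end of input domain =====

-- B builds the 8 symmetries with one rot90 helper iterated in two 3-step loops instead of A's seven closed-form formulas; same return value.
-- ===== PORT A =====
def generate_symmetries (pattern : List (Int × Int)) : List (List (Int × Int)) :=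
  let rot90_pattern := pattern.map (fun rc => (rc.2, 3 - rc.1))
  let rot180_pattern := pattern.map (fun rc => (3 - rc.1, 3 - rc.2))
  let rot270_pattern := pattern.map (fun rc => (3 - rc.2, rc.1))
  let flip_pattern := pattern.map (fun rc => (rc.1, 3 - rc.2))
  let flip_rot90_pattern := flip_pattern.map (fun rc => (rc.2, 3 - rc.1))
  let flip_rot180_pattern := flip_pattern.map (fun rc => (3 - rc.1, 3 - rc.2))
  let flip_rot270_pattern := flip_pattern.map (fun rc => (3 - rc.2, rc.1))
  [pattern, rot90_pattern, rot180_pattern, rot270_pattern, flip_pattern,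
   flip_rot90_pattern, flip_rot180_pattern, flip_rot270_pattern]

-- ===== PORT B =====
-- rot(p) from Source B
def pvRot (p : List (Int × Int)) : List (Int × Int) := p.map (fun rc => (rc.2, 3 - rc.1))

-- one iteration of Source B's 'for _ in range(3)' loop body: cur = rot(cur); syms.append(cur)
def pvSpin (st : List (List (Int × Int)) × List (Int × Int)) (_i : Int) :
    List (List (Int × Int)) × List (Int × Int) :=
  let cur := pvRot st.2
  (st.1 ++ [cur], cur)

def generate_symmetries_alt (pattern : List (Int × Int)) : List (List (Int × Int)) :=
  let st1 := (PySem.List.pyRange 0 3 1).foldl pvSpin ([pattern], pattern)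
  let flip := pattern.map (fun rc => (rc.1, 3 - rc.2))
  let st2 := (PySem.List.pyRange 0 3 1).foldl pvSpin (st1.1 ++ [flip], flip)
  st2.1

-- ===== PRECONDITION & SPEC =====
def Spec_generate_symmetries (pattern : List (Int × Int)) (out : List (List (Int × Int))) : Prop := out = generate_symmetries_alt pattern
instance (pattern : List (Int × Int)) (out : List (List (Int × Int))) : Decidable (Spec_generate_symmetries pattern out) := by unfold Spec_generate_symmetries; infer_instance

-- ===== CLAIM (what is proved, stated in full; the proofs are below) =====
def Claim_equal_generate_symmetries : Prop := ∀ (pattern : List (Int × Int)), Dom_generate_symmetries pattern → Spec_generate_symmetries pattern (generate_symmetries pattern)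

-- ===== LEMMAS AND PROOFS =====
lemma pyRange03 : PySem.List.pyRange 0 3 1 = [0, 1, 2] := by decide

-- three iterations of rot equal A's rot270 closed form
lemma rot3_eq (p : List (Int × Int)) :
    pvRot (pvRot (pvRot p)) = p.map (fun rc => (3 - rc.2, rc.1)) := by
  simp only [pvRot, List.map_map]
  apply List.map_congr_left
  intro a _
  simp only [Function.comp]
  refine Prod.ext rfl ?_
  omega

-- ===== VERDICT (by name: the statement is the Claim_ definition above) =====
theorem generate_symmetries_spec : Claim_equal_generate_symmetries := by
  intro pattern _
  show generate_symmetries pattern = generate_symmetries_alt pattern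
  simp only [generate_symmetries, generate_symmetries_alt, pyRange03, List.foldl, pvSpin]
  simp only [List.cons_append, List.nil_append]
  rw [rot3_eq, rot3_eq]
  simp [pvRot, List.map_map, Function.comp]
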